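-- pv_equiv track=rewrite | github.com/ryanhan1201/Compiler_ChocoPy | pa4-benches/program_169_2.py | cube
-- ===== SOURCE A (Python) =====
-- def cube(x: int) -> int:
--     square: int = 0
--     result: int = 0
--     i: int = 0
--     square = x * x
--
--     while i < x:
--         result = result + square
--         i = i + 1
--
--     return result
-- ===== SOURCE B (Python) =====
-- def cube(x: int) -> int:
--     return x * x * x if x > 0 else 0
-- ===== Notes on version B (the rewrite author's own statement) =====
-- stated objective: faster
-- what changed: Replaces the O(x) repeated-addition loop with the closed-form x*x*x (0 for non-positive x).
import Mathlib
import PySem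

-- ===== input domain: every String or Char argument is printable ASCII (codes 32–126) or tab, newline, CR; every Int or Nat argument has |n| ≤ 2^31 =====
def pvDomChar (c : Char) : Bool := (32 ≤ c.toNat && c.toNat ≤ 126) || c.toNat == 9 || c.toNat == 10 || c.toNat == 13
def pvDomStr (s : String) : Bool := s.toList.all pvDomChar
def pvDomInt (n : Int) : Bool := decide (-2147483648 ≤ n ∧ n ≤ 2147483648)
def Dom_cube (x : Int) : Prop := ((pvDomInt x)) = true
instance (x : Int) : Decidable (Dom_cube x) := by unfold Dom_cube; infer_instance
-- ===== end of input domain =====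

-- B replaces A's O(x) repeated-addition loop with the closed form x*x*x (0 for x ≤ 0).

-- ===== PORT A =====
-- The while loop 'while i < x' runs exactly x.toNat times starting from i = 0;
-- we transliterate it with that fuel, keeping the guard 'i < x' and the same state.
def cubeGo (x square : Int) (result i : Int) : Nat → Int
  | 0 => result
  | n + 1 => if i < x then cubeGo x square (result + square) (i + 1) n else result

def cube (x : Int) : Int :=
  let square : Int := x * x
  let result : Int := 0
  let i : Int := 0
  cubeGo x square result i x.toNat

-- ===== PORT B =====
def cube_alt (x : Int) : Int := if x > 0 then x * x * x else 0

-- ===== PRECONDITION & SPEC =====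
def Spec_cube (x : Int) (out : Int) : Prop := out = cube_alt x
instance (x : Int) (out : Int) : Decidable (Spec_cube x out) := by unfold Spec_cube; infer_instance

-- ===== CLAIM (what is proved, stated in full; the proofs are below) =====
def Claim_equal_cube : Prop := ∀ (x : Int), Dom_cube x → Spec_cube x (cube x)

-- ===== LEMMAS AND PROOFS =====

-- loop invariant: with fuel n = (x - i).toNat the loop adds square exactly n times
theorem cubeGo_eq (x square : Int) : ∀ (n : Nat) (result i : Int),
    (x - i).toNat = n → cubeGo x square result i n = result + square * n := by
  intro n
  induction n with
  | zero => intro result i _; simp [cubeGo]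
  | succ k ih =>
    intro result i h
    have hlt : i < x := by omega
    simp only [cubeGo, if_pos hlt]
    rw [ih (result + square) (i + 1) (by omega)]
    push_cast
    ring

-- ===== VERDICT (by name: the statement is the Claim_ definition above) =====
theorem cube_spec : Claim_equal_cube := by
  intro x _
  unfold Spec_cube cube cube_alt
  rw [cubeGo_eq x (x * x) x.toNat 0 0 (by omega)]
  by_cases hx : x > 0
  · simp only [if_pos hx]
    have : (x.toNat : Int) = x := by omega
    rw [this]; ring
  · simp only [if_neg hx]
    have : (x.toNat : Int) = 0 := by omega
    rw [this]; ring
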